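-- pv_equiv track=rewrite | github.com/huangrichao2020/agchk | agchk/report.py | _architecture_layer_rows
-- ===== SOURCE A (Python) =====
-- from typing import Any, Dict, Optional
--
-- def _architecture_layer_rows(findings: list[dict[str, Any]]) -> list[tuple[str, int, str]]:
--     severity_weight = {"critical": 4, "high": 3, "medium": 2, "low": 1}
--     layers: dict[str, dict[str, Any]] = {}
--     for finding in findings:
--         layer = finding.get("source_layer") or "unknown"
--         item = layers.setdefault(layer, {"weight": 0, "title": finding.get("title", "Unknown")})
--         item["weight"] += severity_weight.get(finding.get("severity", "low"), 1)
--         if severity_weight.get(finding.get("severity", "low"), 1) > severity_weight.get(item.get("severity", "low"), 1):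
--             item["title"] = finding.get("title", "Unknown")
--             item["severity"] = finding.get("severity", "low")
--     return [
--         (layer, data["weight"], data["title"])
--         for layer, data in sorted(layers.items(), key=lambda pair: pair[1]["weight"], reverse=True)[:4]
--     ]
-- ===== SOURCE B (Python) =====
-- def _architecture_layer_rows(findings):
--     severity_weight = {"critical": 4, "high": 3, "medium": 2, "low": 1}
--     # Phase 1: group findings by layer, in first-encounter order.
--     groups = {}
--     for f in findings:
--         groups.setdefault(f.get("source_layer") or "unknown", []).append(f)
--     # Phase 2: reduce each group to (total weight, title of earliest strict-max-severity finding).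
--     stats = {}
--     for layer, group in groups.items():
--         weight = 0
--         best = 1
--         title = group[0].get("title", "Unknown")
--         for f in group:
--             w = severity_weight.get(f.get("severity", "low"), 1)
--             weight += w
--             if w > best:
--                 best = w
--                 title = f.get("title", "Unknown")
--         stats[layer] = (weight, title)
--     top = sorted(stats.items(), key=lambda kv: kv[1][0], reverse=True)[:4]
--     return [(layer, wt[0], wt[1]) for layer, wt in top]
-- ===== Notes on version B (the rewrite author's own statement) =====
-- stated objective: alternative
-- what changed: A maintains one dict of running per-layer aggregates mutated while scanning the findings; B decomposes the task into two phases — first group the findings by layer into an insertion-ordered dict of lists, then reduce each group separately to (total weight, title) — before the same stable sort-by-weight and top-4 cut.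
import Mathlib
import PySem

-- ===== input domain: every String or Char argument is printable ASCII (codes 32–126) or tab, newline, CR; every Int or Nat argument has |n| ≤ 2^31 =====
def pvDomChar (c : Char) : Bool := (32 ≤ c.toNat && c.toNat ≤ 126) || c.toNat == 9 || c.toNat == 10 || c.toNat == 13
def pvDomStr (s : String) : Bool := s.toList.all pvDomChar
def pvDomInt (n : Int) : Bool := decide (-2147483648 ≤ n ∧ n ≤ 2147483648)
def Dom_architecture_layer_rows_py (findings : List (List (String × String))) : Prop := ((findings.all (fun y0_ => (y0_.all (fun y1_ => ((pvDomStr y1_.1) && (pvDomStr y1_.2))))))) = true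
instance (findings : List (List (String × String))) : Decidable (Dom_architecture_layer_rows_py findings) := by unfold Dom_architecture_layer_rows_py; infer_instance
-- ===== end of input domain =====

-- B re-implements the single running-aggregate dict pass as two phases (group by layer, then reduce
-- each group); same results, different decomposition (objective: alternative, no speed claim).

-- ===== PORT A =====
-- finding.get(k, d) / finding.get(k)  (a finding is a dict, modelled as an association list)
def pvGet? (f : List (String × String)) (k : String) : Option String :=
  (PySem.Dict.mk f).get? k

def pvGetD (f : List (String × String)) (k d : String) : String :=
  ((PySem.Dict.mk f).get? k).getD d

-- severity_weight.get(s, 1)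
def pvSevW (s : String) : Int :=
  (PySem.Dict.ofList [("critical", (4 : Int)), ("high", 3), ("medium", 2), ("low", 1)]).getD s 1

-- finding.get("source_layer") or "unknown"   (None and "" are both falsy)
def pvLayerOf (f : List (String × String)) : String :=
  match pvGet? f "source_layer" with
  | some s => if s = "" then "unknown" else s
  | none => "unknown"

-- severity_weight.get(item.get("severity", "low"), 1): the item's "severity" key may be absent
def pvSevOptW (o : Option String) : Int := pvSevW (o.getD "low")

-- the mutations A performs on one layer item for one finding
-- (item value = (weight, title, optional severity), mirroring A's heterogeneous dict)
def pvStepItemA (item : Int × String × Option String) (f : List (String × String)) :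
    Int × String × Option String :=
  let w := pvSevW (pvGetD f "severity" "low")
  let item1 := (item.1 + w, item.2)
  if w > pvSevOptW item1.2.2 then (item1.1, pvGetD f "title" "Unknown", some (pvGetD f "severity" "low"))
  else item1

-- one iteration of A's loop over `findings`
def pvStepA (layers : PySem.Dict String (Int × String × Option String))
    (f : List (String × String)) : PySem.Dict String (Int × String × Option String) :=
  let layer := pvLayerOf f
  let d := layers.setdefault layer (0, pvGetD f "title" "Unknown", none)
  d.insert layer (pvStepItemA (d.getD layer (0, "Unknown", none)) f)

def architecture_layer_rows_py (findings : List (List (String × String))) :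
    List (String × Int × String) :=
  let layers := findings.foldl pvStepA PySem.Dict.empty
  ((PySem.List.sorted layers.items (fun p => p.2.1) true).take 4).map
    (fun p => (p.1, p.2.1, p.2.2.1))

-- ===== PORT B =====
-- one iteration of B's inner loop: state = (weight so far, best severity weight so far, title)
def pvStepB (st : Int × Int × String) (f : List (String × String)) : Int × Int × String :=
  let w := pvSevW (pvGetD f "severity" "low")
  let st1 := (st.1 + w, st.2)
  if w > st1.2.1 then (st1.1, w, pvGetD f "title" "Unknown") else st1

-- B's per-group reduction; groups are built non-empty, so group[0] is pyGetD fs 0 [] there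
def pvReduceB (fs : List (List (String × String))) : Int × String :=
  let st := fs.foldl pvStepB (0, 1, pvGetD (PySem.List.pyGetD fs 0 []) "title" "Unknown")
  (st.1, st.2.2)

def architecture_layer_rows_py_alt (findings : List (List (String × String))) :
    List (String × Int × String) :=
  let groups := findings.foldl
    (fun g f => g.modify (pvLayerOf f) [] (fun fs => fs ++ [f])) PySem.Dict.empty
  let stats := groups.items.foldl
    (fun s p => s.insert p.1 (pvReduceB p.2)) PySem.Dict.empty
  ((PySem.List.sorted stats.items (fun p => p.2.1) true).take 4).map
    (fun p => (p.1, p.2.1, p.2.2))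

-- ===== PRECONDITION & SPEC =====
def Spec_architecture_layer_rows_py (findings : List (List (String × String))) (out : List (String × Int × String)) : Prop := out = architecture_layer_rows_py_alt findings
instance (findings : List (List (String × String))) (out : List (String × Int × String)) : Decidable (Spec_architecture_layer_rows_py findings out) := by unfold Spec_architecture_layer_rows_py; infer_instance

-- ===== CLAIM (what is proved, stated in full; the proofs are below) =====
def Claim_equal_architecture_layer_rows_py : Prop := ∀ (findings : List (List (String × String))), Dom_architecture_layer_rows_py findings → Spec_architecture_layer_rows_py findings (architecture_layer_rows_py findings)

-- ===== LEMMAS AND PROOFS =====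

-- A's per-layer item, as a function of that layer's group of findings (for non-empty groups)
def pvItemAOf (fs : List (List (String × String))) : Int × String × Option String :=
  fs.foldl pvStepItemA (0, pvGetD (PySem.List.pyGetD fs 0 []) "title" "Unknown", none)

-- the state of B's inner loop determined by the state of A's item fold
def pvAbsB (r : Int × String × Option String) : Int × Int × String :=
  (r.1, pvSevOptW r.2.2, r.2.1)

lemma pvStepB_absB (st : Int × String × Option String) (f : List (String × String)) :
    pvStepB (pvAbsB st) f = pvAbsB (pvStepItemA st f) := by
  obtain ⟨a, t, so⟩ := st
  simp only [pvStepB, pvStepItemA, pvAbsB]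
  split_ifs with h
  · simp [pvSevOptW]
  · rfl

-- B's inner fold tracks exactly (weight, severity weight, title) of A's item fold
lemma pvFoldB_eq_foldA (fs : List (List (String × String))) :
    ∀ (st : Int × String × Option String),
      fs.foldl pvStepB (pvAbsB st) = pvAbsB (fs.foldl pvStepItemA st) := by
  induction fs with
  | nil => intro st; rfl
  | cons f fs ih => intro st; simp only [List.foldl_cons, pvStepB_absB, ih]

lemma pvReduceB_eq (fs : List (List (String × String))) :
    pvReduceB fs = ((pvItemAOf fs).1, (pvItemAOf fs).2.1) := by
  have h := pvFoldB_eq_foldA fs (0, pvGetD (PySem.List.pyGetD fs 0 []) "title" "Unknown", none)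
  simp only [pvAbsB] at h
  have h1 : pvSevOptW none = 1 := rfl
  rw [h1] at h
  simp only [pvReduceB, pvItemAOf, h]

lemma pvItemAOf_append (fs : List (List (String × String))) (f : List (String × String))
    (h : fs ≠ []) : pvItemAOf (fs ++ [f]) = pvStepItemA (pvItemAOf fs) f := by
  cases fs with
  | nil => exact absurd rfl h
  | cons x xs =>
    simp only [pvItemAOf, List.cons_append, List.foldl_cons, List.foldl_append,
      List.foldl_cons, List.foldl_nil, PySem.List.pyGetD_zero_cons]

-- main invariant: A's dict is the image of B's grouping dict under pvItemAOf
lemma pvMain (l : List (List (String × String))) :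
    ∀ (d : PySem.Dict String (Int × String × Option String))
      (g : PySem.Dict String (List (List (String × String)))),
      g.keys.Nodup →
      (∀ p ∈ g.items, p.2 ≠ []) →
      d.items = g.items.map (fun p => (p.1, pvItemAOf p.2)) →
      (l.foldl pvStepA d).items
        = ((l.foldl (fun g f => g.modify (pvLayerOf f) [] (fun fs => fs ++ [f])) g).items).map
            (fun p => (p.1, pvItemAOf p.2)) := by
  induction l with
  | nil => intro d g _ _ hdg; simpa using hdg
  | cons f l ih =>
    intro d g hnd hne hdg
    simp only [List.foldl_cons]
    have hkeys : d.keys = g.keys := by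
      simp only [PySem.Dict.keys, hdg, List.map_map]; rfl
    have hdnd : d.keys.Nodup := hkeys ▸ hnd
    have hcont : d.contains (pvLayerOf f) = g.contains (pvLayerOf f) := by
      rw [PySem.Dict.contains_eq_decide_mem_keys, PySem.Dict.contains_eq_decide_mem_keys, hkeys]
    by_cases hc : g.contains (pvLayerOf f) = true
    · -- existing layer: both sides rewrite the entry in place
      set ℓ := pvLayerOf f with hℓ
      have hdc : d.contains ℓ = true := by rw [hcont]; exact hc
      have hfind : ∃ fs, (ℓ, fs) ∈ g.items := by
        have : ℓ ∈ g.keys := by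
          have := PySem.Dict.contains_eq_decide_mem_keys g ℓ
          rw [hc] at this; exact of_decide_eq_true this.symm
        simp only [PySem.Dict.keys, List.mem_map] at this
        obtain ⟨p, hp, hp1⟩ := this
        exact ⟨p.2, by rw [← hp1]; exact hp⟩
      obtain ⟨fs, hfs⟩ := hfind
      have hfsne : fs ≠ [] := hne _ hfs
      have hgget : g.getD ℓ [] = fs := PySem.Dict.getD_of_mem_items g hfs hnd []
      have hdget : d.getD ℓ (0, "Unknown", none) = pvItemAOf fs := by
        have hmem : (ℓ, pvItemAOf fs) ∈ d.items := by
          rw [hdg]; exact List.mem_map.mpr ⟨(ℓ, fs), hfs, rfl⟩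
        exact PySem.Dict.getD_of_mem_items d hmem hdnd _
      have hstep : pvStepA d f = d.insert ℓ (pvStepItemA (pvItemAOf fs) f) := by
        simp only [pvStepA, ← hℓ, PySem.Dict.setdefault_of_contains d _ hdc, hdget]
      have hgstep : g.modify ℓ [] (fun fs => fs ++ [f]) = g.insert ℓ (fs ++ [f]) := by
        simp only [PySem.Dict.modify, hgget]
      rw [hstep, hgstep]
      apply ih
      · rw [PySem.Dict.keys_insert_of_contains g _ hc]; exact hnd
      · intro p hp
        rw [PySem.Dict.items_insert_of_contains g _ hc] at hp
        obtain ⟨q, hq, hqe⟩ := List.mem_map.mp hp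
        by_cases hq1 : (q.1 == ℓ) = true
        · rw [if_pos hq1] at hqe; rw [← hqe]; simp
        · rw [if_neg hq1] at hqe; rw [← hqe]; exact hne q hq
      · rw [PySem.Dict.items_insert_of_contains d _ hdc,
          PySem.Dict.items_insert_of_contains g _ hc, hdg, List.map_map, List.map_map]
        apply List.map_congr_left
        intro p hp
        by_cases hq1 : p.1 = ℓ
        · simp only [Function.comp_apply, hq1, beq_self_eq_true, if_pos]
          rw [pvItemAOf_append fs f hfsne]
        · simp [hq1]
    · -- new layer: both sides append a fresh entry
      set ℓ := pvLayerOf f with hℓ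
      have hc' : g.contains ℓ = false := by simpa using hc
      have hdc : d.contains ℓ = false := by rw [hcont]; exact hc'
      have hstep : pvStepA d f
          = d.insert ℓ (pvStepItemA (0, pvGetD f "title" "Unknown", none) f) := by
        simp only [pvStepA, ← hℓ, PySem.Dict.setdefault_of_not_contains d _ hdc,
          PySem.Dict.getD_insert_self, PySem.Dict.insert_insert_self]
      have hgstep : g.modify ℓ [] (fun fs => fs ++ [f]) = g.insert ℓ [f] := by
        simp only [PySem.Dict.modify, PySem.Dict.getD_of_not_contains g _ hc', List.nil_append]
      rw [hstep, hgstep]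
      apply ih
      · rw [PySem.Dict.keys_insert_of_not_contains g _ hc']
        have hℓnot : ℓ ∉ g.keys := by
          have h2 := PySem.Dict.contains_eq_decide_mem_keys g ℓ
          rw [hc'] at h2
          exact of_decide_eq_false h2.symm
        exact List.Nodup.append hnd (List.nodup_singleton ℓ)
          (List.disjoint_singleton.mpr hℓnot)
      · intro p hp
        rw [PySem.Dict.items_insert_of_not_contains g _ hc'] at hp
        rcases List.mem_append.mp hp with h1 | h1
        · exact hne p h1
        · simp only [List.mem_singleton] at h1; rw [h1]; simp
      · rw [PySem.Dict.items_insert_of_not_contains d _ hdc,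
          PySem.Dict.items_insert_of_not_contains g _ hc', List.map_append, hdg]
        simp only [List.map_cons, List.map_nil, pvItemAOf, List.foldl_cons, List.foldl_nil,
          PySem.List.pyGetD_zero_cons]

-- B's second pass over distinct fresh keys builds exactly the mapped items list
lemma pvStats_items (g : PySem.Dict String (List (List (String × String))))
    (hnd : g.keys.Nodup) :
    (g.items.foldl (fun s p => s.insert p.1 (pvReduceB p.2)) PySem.Dict.empty).items
      = g.items.map (fun p => (p.1, pvReduceB p.2)) := by
  have := PySem.Dict.items_foldl_insert_fresh g.items (fun p => p.1) (fun p => pvReduceB p.2)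
    PySem.Dict.empty (fun a _ => rfl) hnd
  simpa using this

-- stable sort commutes with mapping the elements when the order relation factors through the map
lemma pvInsertBy_map {α β : Type} (φ : α → β) (p : α → α → Bool) (p' : β → β → Bool)
    (h : ∀ a b, p' (φ a) (φ b) = p a b) (x : α) (l : List α) :
    PySem.List.insertBy p' (φ x) (l.map φ) = (PySem.List.insertBy p x l).map φ := by
  induction l with
  | nil => rfl
  | cons y ys ih =>
    simp only [List.map_cons, PySem.List.insertBy, h]
    split_ifs with hb
    · rfl
    · simp only [List.map_cons, ih]

lemma pvSorted_map0 {α β : Type} (φ : α → β) (key : β → Int) (l : List α) :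
    PySem.List.sorted (l.map φ) key true
      = (PySem.List.sorted l (fun x => key (φ x)) true).map φ := by
  rw [PySem.List.sorted_rev_eq_foldl_insertBy, PySem.List.sorted_rev_eq_foldl_insertBy,
    List.foldl_map]
  have : ∀ (acc : List α),
      l.foldl (fun acc x => PySem.List.insertBy (fun a b => decide (key b < key a)) (φ x) acc)
        (acc.map φ)
      = (l.foldl (fun acc x =>
          PySem.List.insertBy (fun a b => decide (key (φ b) < key (φ a))) x acc) acc).map φ := by
    induction l with
    | nil => intro acc; rfl
    | cons y ys ih =>
      intro acc
      simp only [List.foldl_cons,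
        pvInsertBy_map φ (fun a b => decide (key (φ b) < key (φ a)))
          (fun a b => decide (key b < key a)) (fun a b => rfl) y acc, ih]
  simpa using this []

lemma pvSorted_map (l : List (String × Int × String × Option String)) :
    PySem.List.sorted (l.map (fun q => (q.1, q.2.1, q.2.2.1))) (fun p => p.2.1) true
      = (PySem.List.sorted l (fun p => p.2.1) true).map (fun q => (q.1, q.2.1, q.2.2.1)) := by
  have := pvSorted_map0 (fun q : String × Int × String × Option String => (q.1, q.2.1, q.2.2.1))
    (fun p => p.2.1) l
  simpa using this

-- ===== VERDICT (by name: the statement is the Claim_ definition above) =====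
theorem architecture_layer_rows_py_spec : Claim_equal_architecture_layer_rows_py := by
  intro findings _
  show architecture_layer_rows_py findings = architecture_layer_rows_py_alt findings
  have hmain := pvMain findings (PySem.Dict.empty : PySem.Dict String (Int × String × Option String))
    (PySem.Dict.empty : PySem.Dict String (List (List (String × String))))
    PySem.Dict.nodup_keys_empty (fun p hp => nomatch hp) (by rfl)
  simp only [architecture_layer_rows_py, architecture_layer_rows_py_alt]
  set G := findings.foldl
    (fun g f => g.modify (pvLayerOf f) [] (fun fs => fs ++ [f])) PySem.Dict.empty with hG
  have hGnd : G.keys.Nodup := by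
    rw [hG]
    exact PySem.Dict.nodup_keys_foldl_modify_key findings pvLayerOf [] (fun _ f fs => fs ++ [f])
      PySem.Dict.empty PySem.Dict.nodup_keys_empty
  rw [hmain, pvStats_items G hGnd]
  have hvals : G.items.map (fun p => (p.1, pvReduceB p.2))
      = (G.items.map (fun p => (p.1, pvItemAOf p.2))).map (fun q => (q.1, q.2.1, q.2.2.1)) := by
    rw [List.map_map]
    apply List.map_congr_left
    intro p _
    simp only [Function.comp_apply, pvReduceB_eq]
  rw [hvals, pvSorted_map (G.items.map (fun p => (p.1, pvItemAOf p.2)))]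
  rw [← List.map_take, List.map_map]
  rfl
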